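-- pv_equiv track=rewrite | github.com/AbdulHakeemPH40/cortex | src/agent/src/tools/BashTool/pathValidation.py | _grep_extractor
-- ===== SOURCE A (Python) =====
-- from typing import Any, Dict, List, Literal, Optional, Set, Tuple, Union
--
-- def parse_pattern_command(
--     args: List[str],
--     flags_with_args: Set[str],
--     defaults: Optional[List[str]] = None,
-- ) -> List[str]:
--     """Helper: Parse grep/rg style commands (pattern then paths)."""
--     if defaults is None:
--         defaults = []
--
--     paths = []
--     pattern_found = False
--     # SECURITY: Track `--` end-of-options delimiter. After `--`, all args are
--     # positional regardless of leading `-`. See filter_out_flags() doc comment.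
--     after_double_dash = False
--
--     i = 0
--     while i < len(args):
--         arg = args[i]
--         if arg is None:
--             i += 1
--             continue
--
--         if not after_double_dash and arg == '--':
--             after_double_dash = True
--             i += 1
--             continue
--
--         if not after_double_dash and arg.startswith('-'):
--             flag = arg.split('=')[0]
--             # Pattern flags mark that we've found the pattern
--             if flag in ['-e', '--regexp', '-f', '--file']:
--                 pattern_found = True
--             # Skip next arg if flag needs it
--             if flag in flags_with_args and '=' not in arg:
--                 i += 1
--             i += 1
--             continue
--
--         # First non-flag is pattern, rest are paths
--         if not pattern_found:
--             pattern_found = True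
--             i += 1
--             continue
--
--         paths.append(arg)
--         i += 1
--
--     return paths if paths else defaults
--
-- def _grep_extractor(args: List[str]) -> List[str]:
--     """grep: pattern then paths, defaults to stdin"""
--     flags = {
--         '-e', '--regexp', '-f', '--file',
--         '--exclude', '--include', '--exclude-dir', '--include-dir',
--         '-m', '--max-count',
--         '-A', '--after-context', '-B', '--before-context', '-C', '--context',
--     }
--     paths = parse_pattern_command(args, flags)
--
--     # Special: if -r/-R flag present and no paths, use current dir
--     if not paths and any(a in ['-r', '-R', '--recursive'] for a in args):
--         return ['.']
--
--     return paths
-- ===== SOURCE B (Python) =====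
-- # B: two-stage decomposition — a lexer pops from an explicit stack and emits a
-- # tagged token stream ('pat' for pattern-supplying flags, 'pos' for positional
-- # tokens); a declarative selector then derives the paths from the stream alone:
-- # all positionals if the stream STARTS with a 'pat' token, otherwise all but
-- # the first positional.
-- _ARG_FLAGS = frozenset({
--     '-e', '--regexp', '-f', '--file',
--     '--exclude', '--include', '--exclude-dir', '--include-dir',
--     '-m', '--max-count',
--     '-A', '--after-context', '-B', '--before-context', '-C', '--context',
-- })
-- _PATTERN_FLAGS = frozenset({'-e', '--regexp', '-f', '--file'})
--
-- def _tokenize(args):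
--     toks = []
--     stack = list(reversed(args))
--     while stack:
--         a = stack.pop()
--         if a is None:
--             continue
--         if a == '--':
--             toks.extend(('pos', x) for x in reversed(stack) if x is not None)
--             break
--         if a.startswith('-'):
--             flag = a.split('=')[0]
--             if flag in _PATTERN_FLAGS:
--                 toks.append(('pat', flag))
--             if flag in _ARG_FLAGS and '=' not in a and stack:
--                 stack.pop()
--             continue
--         toks.append(('pos', a))
--     return toks
--
-- def _grep_extractor(args):
--     toks = _tokenize(args)
--     positional = [v for k, v in toks if k == 'pos']
--     paths = positional if (toks and toks[0][0] == 'pat') else positional[1:]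
--     if not paths and any(a in ('-r', '-R', '--recursive') for a in args):
--         return ['.']
--     return paths
-- ===== Notes on version B (the rewrite author's own statement) =====
-- stated objective: alternative
-- what changed: B is re-decomposed into a lexer and a selector: a stack-based lexer pops args (stack.pop consumes a flag's value, '--' flushes the rest) and emits a tagged token stream of ('pat', flag) and ('pos', arg) tokens with no path or pattern bookkeeping, and a separate declarative selector then derives the paths purely from the stream — all positionals if the stream starts with a 'pat' token, otherwise all but the first — instead of A's single index-driven while loop interleaving a pattern_found flag with conditional appends and a defaults fallback; same O(n) asymptotics.
import Mathlib
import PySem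

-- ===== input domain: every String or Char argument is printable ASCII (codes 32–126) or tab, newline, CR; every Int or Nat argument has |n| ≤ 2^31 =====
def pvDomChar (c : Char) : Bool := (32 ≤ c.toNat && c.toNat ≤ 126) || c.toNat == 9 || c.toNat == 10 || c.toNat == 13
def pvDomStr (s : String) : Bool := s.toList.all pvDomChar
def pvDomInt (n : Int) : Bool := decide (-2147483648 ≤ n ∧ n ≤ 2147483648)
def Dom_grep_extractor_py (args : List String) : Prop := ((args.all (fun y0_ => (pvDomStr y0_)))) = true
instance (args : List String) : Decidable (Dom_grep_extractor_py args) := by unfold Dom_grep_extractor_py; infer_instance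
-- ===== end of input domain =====

-- B re-decomposes A's single stateful parse into a lexer that emits a tagged
-- token stream and a declarative selector reading only that stream; same O(n) cost.

-- ===== PORT A =====
def patternFlagsA : List String := ["-e", "--regexp", "-f", "--file"]

-- the `while i < len(args)` loop of parse_pattern_command (the `arg is None`
-- branch is vacuous: a List String has no None)
def parseLoopA (args : List String) (flagsWithArgs : PySem.Set String)
    (paths : List String) (patternFound afterDD : Bool) (i : Nat) : List String :=
  if h : i < args.length then
    let arg := args[i]
    if ¬ afterDD ∧ arg = "--" then
      parseLoopA args flagsWithArgs paths patternFound true (i + 1)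
    else if ¬ afterDD ∧ PySem.Str.startswith arg "-" then
      let flag := ((PySem.Str.split? arg "=").getD []).headD ""  -- arg.split('=')[0]
      let patternFound' := if patternFlagsA.contains flag then true else patternFound
      if flagsWithArgs.contains flag ∧ ¬ PySem.Str.isIn "=" arg then
        parseLoopA args flagsWithArgs paths patternFound' afterDD (i + 2)
      else
        parseLoopA args flagsWithArgs paths patternFound' afterDD (i + 1)
    else if patternFound = false then
      parseLoopA args flagsWithArgs paths true afterDD (i + 1)
    else
      parseLoopA args flagsWithArgs (paths ++ [arg]) patternFound afterDD (i + 1)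
  else paths
termination_by args.length - i

def parse_pattern_command (args : List String) (flagsWithArgs : PySem.Set String)
    (defaults : Option (List String)) : List String :=
  let defaults := defaults.getD []     -- if defaults is None: defaults = []
  let paths := parseLoopA args flagsWithArgs [] false false 0
  if paths ≠ [] then paths else defaults   -- paths if paths else defaults

def grepFlagsA : PySem.Set String := PySem.Set.ofList
  ["-e", "--regexp", "-f", "--file",
   "--exclude", "--include", "--exclude-dir", "--include-dir",
   "-m", "--max-count",
   "-A", "--after-context", "-B", "--before-context", "-C", "--context"]

def grep_extractor_py (args : List String) : List String :=
  let paths := parse_pattern_command args grepFlagsA none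
  if paths = [] ∧ args.any (fun a => ["-r", "-R", "--recursive"].contains a) then ["."]
  else paths

-- ===== PORT B =====
def patternFlagsB : PySem.Set String := PySem.Set.ofList ["-e", "--regexp", "-f", "--file"]

def grepArgFlagsB : PySem.Set String := PySem.Set.ofList
  ["-e", "--regexp", "-f", "--file",
   "--exclude", "--include", "--exclude-dir", "--include-dir",
   "-m", "--max-count",
   "-A", "--after-context", "-B", "--before-context", "-C", "--context"]

-- the lexer: `stack = list(reversed(args)); while stack: a = stack.pop(); …`.
-- The stack is represented in POP order (head = next pop), so it starts as
-- `args` itself and `reversed(stack)` in the '--' branch is the list as-is.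
def tokenizeB : List String → List (String × String) → List (String × String)
  | [], toks => toks
  | a :: stack, toks =>
    if a = "--" then toks ++ stack.map (fun x => ("pos", x))  -- extend; break
    else if PySem.Str.startswith a "-" then
      let flag := ((PySem.Str.split? a "=").getD []).headD ""  -- a.split('=')[0]
      let toks' := if patternFlagsB.contains flag then toks ++ [("pat", flag)] else toks
      if grepArgFlagsB.contains flag ∧ ¬ PySem.Str.isIn "=" a then
        tokenizeB stack.tail toks'   -- if stack: stack.pop()
      else tokenizeB stack toks'
    else tokenizeB stack (toks ++ [("pos", a)])
termination_by l _ => l.length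
decreasing_by all_goals simp [List.length_tail]

def grep_extractor_py_alt (args : List String) : List String :=
  let toks := tokenizeB args []
  let positional := (toks.filter (fun t => t.1 = "pos")).map Prod.snd
  -- positional if (toks and toks[0][0] == 'pat') else positional[1:]
  let paths := if (toks.headD ("", "")).1 = "pat" then positional else positional.drop 1
  if paths = [] ∧ args.any (fun a => ["-r", "-R", "--recursive"].contains a) then ["."]
  else paths

-- ===== PRECONDITION & SPEC =====
def Spec_grep_extractor_py (args : List String) (out : List String) : Prop := out = grep_extractor_py_alt args
instance (args : List String) (out : List String) : Decidable (Spec_grep_extractor_py args out) := by unfold Spec_grep_extractor_py; infer_instance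

-- ===== CLAIM (what is proved, stated in full; the proofs are below) =====
def Claim_equal_grep_extractor_py : Prop := ∀ (args : List String), Dom_grep_extractor_py args → Spec_grep_extractor_py args (grep_extractor_py args)

-- ===== LEMMAS AND PROOFS =====

-- arg.split('=')[0], shared by the proof helpers below
def flagOf (a : String) : String := ((PySem.Str.split? a "=").getD []).headD ""

-- canonical token stream of a suffix (proof-side twin of tokenizeB)
def toksOf : List String → List (String × String)
  | [] => []
  | a :: rest =>
    if a = "--" then rest.map (fun x => ("pos", x))
    else if PySem.Str.startswith a "-" then
      (if patternFlagsB.contains (flagOf a) then [("pat", flagOf a)] else []) ++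
        (if grepArgFlagsB.contains (flagOf a) ∧ ¬ PySem.Str.isIn "=" a then toksOf rest.tail
         else toksOf rest)
    else ("pos", a) :: toksOf rest
termination_by l => l.length
decreasing_by all_goals simp [List.length_tail]

-- canonical "positional tokens of the suffix" (after_double_dash = false mode)
def posAll : List String → List String
  | [] => []
  | a :: rest =>
    if a = "--" then rest
    else if PySem.Str.startswith a "-" then
      if grepArgFlagsB.contains (flagOf a) ∧ ¬ PySem.Str.isIn "=" a then posAll rest.tail
      else posAll rest
    else a :: posAll rest
termination_by l => l.length
decreasing_by all_goals simp [List.length_tail]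

-- "a pattern-supplying flag occurs before the first positional token"
def pvfB : List String → Bool
  | [] => false
  | a :: rest =>
    if a = "--" then false
    else if PySem.Str.startswith a "-" then
      patternFlagsB.contains (flagOf a) ||
        (if grepArgFlagsB.contains (flagOf a) ∧ ¬ PySem.Str.isIn "=" a then pvfB rest.tail
         else pvfB rest)
    else false
termination_by l => l.length
decreasing_by all_goals simp [List.length_tail]

-- structural twin of parseLoopA over the suffix of args
def suffixLoop : List String → List String → Bool → Bool → List String
  | [], paths, _, _ => paths
  | arg :: rest, paths, pf, add =>
    if ¬ add ∧ arg = "--" then suffixLoop rest paths pf true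
    else if ¬ add ∧ PySem.Str.startswith arg "-" then
      if grepFlagsA.contains (flagOf arg) ∧ ¬ PySem.Str.isIn "=" arg then
        suffixLoop rest.tail paths (if patternFlagsA.contains (flagOf arg) then true else pf) add
      else suffixLoop rest paths (if patternFlagsA.contains (flagOf arg) then true else pf) add
    else if pf = false then suffixLoop rest paths true add
    else suffixLoop rest (paths ++ [arg]) pf add
termination_by l _ _ _ => l.length
decreasing_by all_goals simp [List.length_tail]

theorem grepFlagsB_eq : grepArgFlagsB = grepFlagsA := rfl

theorem parseLoopA_eq_suffixLoop (args : List String)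
    (paths : List String) (pf add : Bool) (i : Nat) :
    parseLoopA args grepFlagsA paths pf add i = suffixLoop (args.drop i) paths pf add := by
  induction hn : args.length - i using Nat.strong_induction_on generalizing paths pf add i with
  | _ n ih =>
  subst hn
  by_cases h : i < args.length
  · rw [List.drop_eq_getElem_cons h, parseLoopA]
    have IH1 := fun (p : List String) (f a : Bool) =>
      ih (args.length - (i+1)) (by omega) p f a (i+1) rfl
    have IH2 := fun (p : List String) (f a : Bool) =>
      ih (args.length - (i+2)) (by omega) p f a (i+2) rfl
    simp only [h, dif_pos, IH1, IH2, suffixLoop, List.tail_drop, flagOf,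
      show i+1+1 = i+2 from rfl]
    rfl
  · rw [parseLoopA]
    have hd : List.drop i args = [] := List.drop_eq_nil_of_le (by omega)
    simp [h, hd, suffixLoop]

theorem suffixLoop_true_true (l paths : List String) :
    suffixLoop l paths true true = paths ++ l := by
  induction l generalizing paths with
  | nil => simp [suffixLoop]
  | cons a rest ih => simp [suffixLoop, ih]

theorem suffixLoop_true_false (l paths : List String) :
    suffixLoop l paths true false = paths ++ posAll l := by
  fun_induction posAll l generalizing paths
  all_goals simp only [suffixLoop]
  all_goals simp_all [suffixLoop_true_true, grepFlagsB_eq]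

theorem suffixLoop_add (l paths : List String) (pf : Bool) :
    suffixLoop l paths pf true = paths ++ (if pf then l else l.drop 1) := by
  cases l <;> cases pf <;> simp [suffixLoop, suffixLoop_true_true]

theorem suffixLoop_pf_false (l : List String) (pf : Bool) :
    suffixLoop l [] pf false =
      if pf || pvfB l then posAll l else (posAll l).drop 1 := by
  induction hn : l.length using Nat.strong_induction_on generalizing l pf with
  | _ n ih =>
  subst hn
  cases l with
  | nil => cases pf <;> simp [suffixLoop, pvfB, posAll]
  | cons a rest =>
    by_cases hdd : a = "--"
    · subst hdd
      cases pf <;> simp [suffixLoop, pvfB, posAll, suffixLoop_add]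
    · by_cases hfl : PySem.Str.startswith a "-" = true
      · by_cases hc : grepFlagsA.contains (flagOf a) = true ∧ ¬ PySem.Str.isIn "=" a = true
        · cases hp : patternFlagsA.contains (flagOf a) with
          | true =>
            have hbp : patternFlagsB.contains (flagOf a) = true := by
              simp [patternFlagsA] at hp
              rcases hp with h|h|h|h <;> rw [h] <;> decide
            simp only [suffixLoop, pvfB, posAll, hdd, hfl, hc, hp, grepFlagsB_eq, hbp]
            simp_all [suffixLoop_true_false, flagOf]
          | false =>
            have hbp : patternFlagsB.contains (flagOf a) = false := by
              revert hp; unfold patternFlagsA patternFlagsB PySem.Set.ofList; simp [flagOf]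
            simp only [suffixLoop, pvfB, posAll, hdd, hfl, hc, hp, grepFlagsB_eq, hbp,
              Bool.false_eq_true, reduceIte, Bool.false_or]
            have h1 : rest.tail.length < (a :: rest).length := by
              simp [List.length_tail]
            simp only [ih rest.tail.length h1 rest.tail pf rfl]
            simp_all [flagOf]
        · cases hp : patternFlagsA.contains (flagOf a) with
          | true =>
            have hbp : patternFlagsB.contains (flagOf a) = true := by
              simp [patternFlagsA] at hp
              rcases hp with h|h|h|h <;> rw [h] <;> decide
            simp only [suffixLoop, pvfB, posAll, hdd, hfl, hc, hp, grepFlagsB_eq, hbp]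
            simp_all [suffixLoop_true_false, flagOf]
          | false =>
            have hbp : patternFlagsB.contains (flagOf a) = false := by
              revert hp; unfold patternFlagsA patternFlagsB PySem.Set.ofList; simp [flagOf]
            simp only [suffixLoop, pvfB, posAll, hdd, hfl, hc, hp, grepFlagsB_eq, hbp,
              Bool.false_eq_true, reduceIte, Bool.false_or]
            have h1 : rest.length < (a :: rest).length := by simp
            simp only [ih rest.length h1 rest pf rfl]
            simp_all [flagOf]
      · cases pf <;>
          simp_all [suffixLoop, pvfB, posAll, suffixLoop_true_false]

-- B-side: the lexer computes toks ++ toksOf stack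
theorem tokenizeB_eq (l : List String) (toks : List (String × String)) :
    tokenizeB l toks = toks ++ toksOf l := by
  fun_induction toksOf l generalizing toks
  all_goals simp only [tokenizeB]
  all_goals simp_all [flagOf]
  all_goals split_ifs <;> simp_all

-- positional tokens of the stream are exactly posAll
theorem toksOf_pos (l : List String) :
    ((toksOf l).filter (fun t => t.1 = "pos")).map Prod.snd = posAll l := by
  fun_induction toksOf l <;>
    simp_all [posAll, List.filter_map, Function.comp_def, flagOf] <;>
      split_ifs <;> simp_all

-- the stream starts with a 'pat' token iff a pattern flag precedes the first positional
theorem headPat_map (o : Option String) :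
    (((Option.map (fun x => (("pos" : String), x)) o).getD ("", "")).1 = "pat") ↔ False := by
  cases o <;> simp

theorem toksOf_head (l : List String) :
    (((toksOf l).head?.getD ("", "")).1 = "pat") = (pvfB l = true) := by
  fun_induction toksOf l <;> simp_all [pvfB, flagOf, headPat_map] <;>
    (split_ifs <;> simp_all)

-- ===== VERDICT (by name: the statement is the Claim_ definition above) =====
theorem grep_extractor_py_spec : Claim_equal_grep_extractor_py := by
  intro args _
  show grep_extractor_py args = grep_extractor_py_alt args
  simp only [grep_extractor_py, grep_extractor_py_alt, parse_pattern_command,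
    parseLoopA_eq_suffixLoop, List.drop_zero, suffixLoop_pf_false,
    tokenizeB_eq, List.nil_append, toksOf_pos, Bool.false_or, Option.getD_none]
  have hne : ∀ X : List String, (if X ≠ [] then X else []) = X := by
    intro X; split_ifs <;> simp_all
  rw [hne]
  by_cases hv : pvfB args = true <;> simp [hv, toksOf_head]
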